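-- pv_equiv track=rewrite | github.com/tommy2tonez/dg_ballinger | src/utility.py | pair_batchify
-- ===== SOURCE A (Python) =====
-- def pair_batchify(arr: list[tuple[object, object]], batch_sz: int) -> list[tuple[list[object], list[object]]]:
--
--     num_batch: int = len(arr) // batch_sz
--     rs = []
--
--     for i in range(num_batch):
--         b           = i * batch_sz
--         e           = (i + 1) * batch_sz
--         in_batch    = [arr[j][0] for j in range(b,e)]
--         out_batch   = [arr[j][1] for j in range(b,e)]
--         rs          += [(in_batch, out_batch)]
--
--     return rs
-- ===== SOURCE B (Python) =====
-- def pair_batchify(arr: list[tuple[object, object]], batch_sz: int) -> list[tuple[list[object], list[object]]]: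
--     num_batch = len(arr) // batch_sz   # keeps ZeroDivisionError on batch_sz == 0
--     rs = []
--     cur_in, cur_out = [], []
--     for x, y in arr:
--         if len(rs) == num_batch:
--             break
--         cur_in.append(x)
--         cur_out.append(y)
--         if len(cur_in) == batch_sz:
--             rs.append((cur_in, cur_out))
--             cur_in, cur_out = [], []
--     return rs
-- ===== Notes on version B (the rewrite author's own statement) =====
-- stated objective: alternative
-- what changed: Replaces A's per-batch nested index scans (a range over batch indices with two inner range/index comprehensions per batch) by a single element-wise streaming pass that flushes two running lists whenever they reach batch_sz and stops after len(arr)//batch_sz batches.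
import Mathlib
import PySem

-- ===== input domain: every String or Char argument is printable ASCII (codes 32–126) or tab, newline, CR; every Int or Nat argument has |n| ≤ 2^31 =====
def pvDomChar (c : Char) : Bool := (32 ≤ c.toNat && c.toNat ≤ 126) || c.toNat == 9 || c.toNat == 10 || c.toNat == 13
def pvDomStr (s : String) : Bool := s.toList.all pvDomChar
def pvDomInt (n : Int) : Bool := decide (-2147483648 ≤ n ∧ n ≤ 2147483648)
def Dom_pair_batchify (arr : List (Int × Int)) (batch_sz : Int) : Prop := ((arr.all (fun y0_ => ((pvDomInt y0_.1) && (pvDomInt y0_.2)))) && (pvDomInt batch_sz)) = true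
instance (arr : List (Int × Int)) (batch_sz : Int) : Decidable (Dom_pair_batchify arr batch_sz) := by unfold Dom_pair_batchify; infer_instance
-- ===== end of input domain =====

-- B replaces A's per-batch nested index scans by a single streaming pass that flushes
-- two running lists whenever batch_sz elements have accumulated (objective: alternative decomposition).

-- ===== PORT A =====
-- per-iteration body: in_batch/out_batch built by indexed comprehensions over range(b, e)
def abatch (arr : List (Int × Int)) (batch_sz i : Int) : List Int × List Int :=
  let b := i * batch_sz
  let e := (i + 1) * batch_sz
  let in_batch := (PySem.List.pyRange b e).map (fun j => (PySem.List.pyGetD arr j (0, 0)).1)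
  let out_batch := (PySem.List.pyRange b e).map (fun j => (PySem.List.pyGetD arr j (0, 0)).2)
  (in_batch, out_batch)

def pair_batchify (arr : List (Int × Int)) (batch_sz : Int) : List (List Int × List Int) :=
  let num_batch := PySem.Int.floordiv (arr.length : Int) batch_sz
  (PySem.List.pyRange 0 num_batch).foldl (fun rs i => rs ++ [abatch arr batch_sz i]) []

-- ===== PORT B =====
-- loop body of B's single pass: break once num_batch batches exist, else append to the
-- running lists and flush them when cur_in reaches batch_sz
def bstep (num_batch batch_sz : Int)
    (st : List (List Int × List Int) × List Int × List Int) (p : Int × Int) :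
    List (List Int × List Int) × List Int × List Int :=
  if (st.1.length : Int) = num_batch then st
  else
    let ci := st.2.1 ++ [p.1]
    let co := st.2.2 ++ [p.2]
    if (ci.length : Int) = batch_sz then (st.1 ++ [(ci, co)], [], []) else (st.1, ci, co)

def pair_batchify_alt (arr : List (Int × Int)) (batch_sz : Int) : List (List Int × List Int) :=
  let num_batch := PySem.Int.floordiv (arr.length : Int) batch_sz
  (arr.foldl (bstep num_batch batch_sz) ([], [], [])).1

-- ===== PRECONDITION & SPEC =====
-- Pre_ excludes only batch_sz = 0, where Python A raises ZeroDivisionError.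
def Pre_pair_batchify (arr : List (Int × Int)) (batch_sz : Int) : Prop := batch_sz ≠ 0
instance (arr : List (Int × Int)) (batch_sz : Int) : Decidable (Pre_pair_batchify arr batch_sz) := by unfold Pre_pair_batchify; infer_instance
def pvWitness_pair_batchify : (List (Int × Int)) × Int := ([(1, 2), (3, 4), (5, 6)], 2)

def Spec_pair_batchify (arr : List (Int × Int)) (batch_sz : Int) (out : List (List Int × List Int)) : Prop := out = pair_batchify_alt arr batch_sz
instance (arr : List (Int × Int)) (batch_sz : Int) (out : List (List Int × List Int)) : Decidable (Spec_pair_batchify arr batch_sz out) := by unfold Spec_pair_batchify; infer_instance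

-- ===== CLAIM (what is proved, stated in full; the proofs are below) =====
def Claim_equal_pair_batchify : Prop := ∀ (arr : List (Int × Int)) (batch_sz : Int), Dom_pair_batchify arr batch_sz → Pre_pair_batchify arr batch_sz → Spec_pair_batchify arr batch_sz (pair_batchify arr batch_sz)

-- ===== LEMMAS AND PROOFS =====

-- reference chunking both ports are reduced to (proof-only)
def chunkAux (k : Nat) : List Int → List Int → List (Int × Int) → List (List Int × List Int)
  | _, _, [] => []
  | ci, co, p :: t =>
      if ci.length + 1 = k then (ci ++ [p.1], co ++ [p.2]) :: chunkAux k [] [] t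
      else chunkAux k (ci ++ [p.1]) (co ++ [p.2]) t

-- once rs has reached num_batch the loop body is the identity
theorem bstep_frozen (N bs : Int) (l : List (Int × Int)) (rs : List (List Int × List Int))
    (ci co : List Int) (h : (rs.length : Int) = N) :
    List.foldl (bstep N bs) (rs, ci, co) l = (rs, ci, co) := by
  induction l generalizing ci co with
  | nil => rfl
  | cons p t ih => simp [bstep, h, ih]

theorem chunkAux_short (k : Nat) : ∀ (l : List (Int × Int)) (ci co : List Int),
    ci.length + l.length < k → chunkAux k ci co l = [] := by
  intro l
  induction l with
  | nil => intro ci co _; rfl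
  | cons p t ih =>
      intro ci co h
      simp only [List.length_cons] at h
      have hne : ¬ (ci.length + 1 = k) := by omega
      simp only [chunkAux, if_neg hne]
      exact ih _ _ (by simp; omega)

-- negative batch size: B's loop never flushes and rs stays empty
theorem bstep_neg (N bs : Int) (hb : bs < 0) (hN : N ≠ 0) :
    ∀ (l : List (Int × Int)) (ci co : List Int),
    (List.foldl (bstep N bs) ([], ci, co) l).1 = [] := by
  intro l
  induction l with
  | nil => intro ci co; rfl
  | cons p t ih =>
      intro ci co
      have h1 : ((([] : List (List Int × List Int)).length : Int)) ≠ N := by simpa using (Ne.symm hN)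
      have h2 : (((ci ++ [p.1]).length : Int)) ≠ bs := by
        simp only [List.length_append, List.length_cons, List.length_nil]
        omega
      simp only [List.foldl_cons, bstep, h1, if_false, if_neg h2]
      simpa using ih (ci ++ [p.1]) (co ++ [p.2])

-- B's loop invariant (positive batch size k)
theorem bstep_inv (k : Nat) (hk : 0 < k) (N : Nat) :
    ∀ (l : List (Int × Int)) (ci co : List Int) (rs : List (List Int × List Int)),
    ci.length < k → rs.length + (ci.length + l.length) / k = N →
    (List.foldl (bstep (N : Int) (k : Int)) (rs, ci, co) l).1 = rs ++ chunkAux k ci co l := by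
  intro l
  induction l with
  | nil =>
      intro ci co rs _ _
      simp [chunkAux]
  | cons p t ih =>
      intro ci co rs hci hN
      by_cases hfit : ci.length + 1 + t.length < k
      · -- no further batch can complete: A-side rs already full, loop frozen
        have hdiv : (ci.length + (p :: t).length) / k = 0 := by
          apply Nat.div_eq_of_lt; simp; omega
        have hrs : (rs.length : Int) = (N : Int) := by
          rw [hdiv] at hN; omega
        rw [bstep_frozen _ _ _ _ _ _ hrs]
        have := chunkAux_short k (p :: t) ci co (by simp; omega)
        simp [this]
      · -- rs is not yet full
        have hq : 1 ≤ (ci.length + (p :: t).length) / k := by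
          apply Nat.one_le_div_iff hk |>.mpr; simp; omega
        have hrs : ((rs.length : Int)) ≠ (N : Int) := by
          have : rs.length < N := by omega
          omega
        by_cases hflush : ci.length + 1 = k
        · have hlen : (((ci ++ [p.1]).length : Int)) = (k : Int) := by
            simp [hflush]
          simp only [List.foldl_cons, bstep, if_neg hrs, if_pos hlen]
          have hN' : (rs ++ [(ci ++ [p.1], co ++ [p.2])]).length + (([] : List Int).length + t.length) / k = N := by
            have : (ci.length + (p :: t).length) / k = t.length / k + 1 := by
              simp only [List.length_cons]
              have : ci.length + (t.length + 1) = t.length + k := by omega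
              rw [this, Nat.add_div_right _ hk]
            simp only [List.length_append, List.length_cons, List.length_nil, Nat.zero_add]
            omega
          rw [ih [] [] _ (by simpa using hk) hN']
          simp [chunkAux, hflush]
        · have hlen : (((ci ++ [p.1]).length : Int)) ≠ (k : Int) := by
            simp only [List.length_append, List.length_cons, List.length_nil]
            omega
          simp only [List.foldl_cons, bstep, if_neg hrs, if_neg hlen]
          have hN' : rs.length + ((ci ++ [p.1]).length + t.length) / k = N := by
            simp only [List.length_append, List.length_cons, List.length_nil]
            simp only [List.length_cons] at hN
            have : ci.length + 1 + t.length = ci.length + (t.length + 1) := by omega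
            rw [this]; exact hN
          rw [ih (ci ++ [p.1]) (co ++ [p.2]) rs (by simp; omega) hN']
          simp [chunkAux, hflush]

-- chunkAux с pending lists: the first emitted batch completes the pending prefix
theorem chunkAux_flush (k : Nat) :
    ∀ (l : List (Int × Int)) (ci co : List Int), ci.length = co.length → ci.length < k →
    k ≤ ci.length + l.length →
    chunkAux k ci co l =
      (ci ++ (l.take (k - ci.length)).map Prod.fst, co ++ (l.take (k - ci.length)).map Prod.snd)
        :: chunkAux k [] [] (l.drop (k - ci.length)) := by
  intro l
  induction l with
  | nil => intro ci co _ h1 h2; simp at h2; omega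
  | cons p t ih =>
      intro ci co hlen h1 h2
      by_cases hflush : ci.length + 1 = k
      · have : k - ci.length = 1 := by omega
        simp [chunkAux, hflush, this]
      · have hk1 : k - ci.length = (k - (ci.length + 1)) + 1 := by omega
        simp only [chunkAux, if_neg hflush]
        rw [ih (ci ++ [p.1]) (co ++ [p.2]) (by simp [hlen]) (by simp; omega) (by simp at h2 ⊢; omega)]
        simp [hk1, List.append_assoc]

-- A's i-th batch equals take/drop on the array (indices all in range)
theorem abatch_eq (arr : List (Int × Int)) (k i : Nat) (h : (i + 1) * k ≤ arr.length) :
    abatch arr (k : Int) (i : Int) =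
      (((arr.drop (i * k)).take k).map Prod.fst, ((arr.drop (i * k)).take k).map Prod.snd) := by
  have hik : (i + 1) * k = i * k + k := by ring
  have hr : PySem.List.pyRange ((i : Int) * k) (((i : Int) + 1) * k) =
      (List.range k).map (fun t => ((i * k + t : Nat) : Int)) := by
    rw [PySem.List.pyRange_one]
    have heq : ((i : Int) + 1) * k - (i : Int) * k = (k : Int) := by ring
    rw [heq, Int.toNat_natCast]
    apply List.map_congr_left
    intro t _
    push_cast; ring
  have hget : ∀ t ∈ List.range k,
      PySem.List.pyGetD arr ((i * k + t : Nat) : Int) (0, 0) = arr.getD (i * k + t) (0, 0) := by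
    intro t _
    exact PySem.List.pyGetD_natCast arr (i * k + t) (0, 0)
  have hbatch : ((arr.drop (i * k)).take k) =
      (List.range k).map (fun t => arr.getD (i * k + t) (0, 0)) := by
    apply List.ext_getElem
    · simp; omega
    · intro n h1 h2
      simp only [List.getElem_take, List.getElem_drop, List.getElem_map, List.getElem_range]
      have hlt : i * k + n < arr.length := by
        simp at h1; omega
      rw [List.getD_eq_getElem arr _ hlt]
  simp only [abatch, hr, List.map_map, hbatch, Prod.mk.injEq]
  constructor <;>
  · apply List.map_congr_left
    intro t ht
    simp only [Function.comp_apply]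
    rw [hget t ht]

-- the list of A's take/drop batches is chunkAux
theorem range_chunks (k : Nat) (hk : 0 < k) :
    ∀ (N : Nat) (arr : List (Int × Int)), N = arr.length / k →
    (List.range N).map (fun i =>
        (((arr.drop (i * k)).take k).map Prod.fst, ((arr.drop (i * k)).take k).map Prod.snd)) =
      chunkAux k [] [] arr := by
  intro N
  induction N with
  | zero =>
      intro arr h
      have : arr.length < k := by
        by_contra hge
        rw [Nat.not_lt] at hge
        have h1 : 1 ≤ arr.length / k := (Nat.one_le_div_iff hk).mpr hge
        omega
      rw [chunkAux_short k arr [] [] (by simpa using this)]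
      simp
  | succ n ih =>
      intro arr h
      have hkle : k ≤ arr.length := by
        by_contra hlt
        rw [Nat.div_eq_of_lt (by omega)] at h
        omega
      rw [chunkAux_flush k arr [] [] rfl (by simpa using hk) (by simpa using hkle)]
      rw [List.range_succ_eq_map]
      simp only [List.map_cons, List.map_map, Nat.zero_mul, List.drop_zero, Nat.sub_zero,
        List.nil_append, List.length_nil]
      congr 1
      have hdrop : ∀ i : Nat, arr.drop ((i + 1) * k) = (arr.drop k).drop (i * k) := by
        intro i
        rw [List.drop_drop]
        congr 1
        ring
      have hlen' : n = (arr.drop k).length / k := by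
        have h2 : (arr.length - k + k) / k = (arr.length - k) / k + 1 := Nat.add_div_right _ hk
        have h3 : arr.length - k + k = arr.length := by omega
        rw [h3] at h2
        simp only [List.length_drop]
        omega
      rw [← ih (arr.drop k) hlen']
      apply List.map_congr_left
      intro i _
      simp only [Function.comp_apply, Nat.succ_eq_add_one, hdrop i]

-- ===== VERDICT (by name: the statement is the Claim_ definition above) =====
theorem pair_batchify_spec : Claim_equal_pair_batchify := by
  intro arr bs _hdom hpre
  unfold Spec_pair_batchify
  simp only [pair_batchify, pair_batchify_alt]
  rcases lt_trichotomy bs 0 with hneg | hzero | hpos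
  · -- negative batch size: both return []
    rcases List.eq_nil_or_concat arr with hnil | _
    · subst hnil; rfl
    · have hlen : 0 < arr.length := by
        cases arr with
        | nil => simp_all
        | cons a t => simp
      have hNneg : PySem.Int.floordiv (arr.length : Int) bs < 0 := by
        have hmul := PySem.Int.floordiv_mul_add_mod (arr.length : Int) bs
        have hbnd := PySem.Int.mod_neg_bounds (arr.length : Int) hneg
        nlinarith [hmul, hbnd.1, hbnd.2, hlen]
      rw [PySem.List.pyRange_one_eq_nil (le_of_lt hNneg)]
      simp only [List.foldl_nil]
      rw [bstep_neg _ _ hneg (by omega) arr [] []]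
  · exact absurd hzero hpre
  · -- positive batch size
    obtain ⟨k, rfl⟩ : ∃ k : Nat, bs = (k : Int) := ⟨bs.toNat, (Int.toNat_of_nonneg hpos.le).symm⟩
    have hk : 0 < k := by exact_mod_cast hpos
    have hN : PySem.Int.floordiv (arr.length : Int) (k : Int) = ((arr.length / k : Nat) : Int) :=
      PySem.Int.floordiv_natCast arr.length k
    rw [hN, PySem.List.foldl_append_singleton_eq_map, List.nil_append,
      PySem.List.pyRange_zero_nat, List.map_map]
    rw [bstep_inv k hk (arr.length / k) arr [] [] [] hk (by simp)]
    rw [List.nil_append, ← range_chunks k hk (arr.length / k) arr rfl]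
    apply List.map_congr_left
    intro i hi
    simp only [Function.comp_apply]
    apply abatch_eq
    rw [List.mem_range] at hi
    calc (i + 1) * k ≤ (arr.length / k) * k := by
          apply Nat.mul_le_mul_right; omega
      _ ≤ arr.length := Nat.div_mul_le_self _ _
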